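-- pv_equiv track=rewrite | github.com/Karl-XZ/Deutsch-Hard-Subtitle-Recognition | ZIMU.py | remove_punctuation_lines
-- ===== SOURCE A (Python) =====
-- import string
--
-- def remove_punctuation_lines(text):
--     # 将文本按行分割
--     lines = text.split('\n')
--
--     # 初始化一个空列表，用于存储非标点符号行
--     non_punctuation_lines = []
--
--     for line in lines:
--         # 去除行两端的空白字符
--         line = line.strip()
--
--         # 检查行是否只包含标点符号
--         if all(char in string.punctuation or char.isspace() for char in line):
--             continue  # 如果是只有标点符号的行，跳过
--         else:
--             non_punctuation_lines.append(line)
--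
--     # 将非标点符号行重新组合为一个字符串
--     result = '\n'.join(non_punctuation_lines)
--
--     return result
-- ===== SOURCE B (Python) =====
-- import string
--
-- def remove_punctuation_lines(text):
--     # Single character-level pass: a small state machine walks the raw text once,
--     # tracking for the current line whether a significant character (neither
--     # punctuation nor whitespace) has been seen; kept lines are stripped and
--     # emitted directly into the output buffer with '\n' separators.
--     out = []        # output character chunks
--     cur = []        # characters of the current line
--     keep = False    # current line contains a significant character
--     first = True    # no line emitted yet
--     for ch in text:
--         if ch == '\n':
--             if keep:
--                 if not first:
--                     out.append('\n')
--                 out.append(''.join(cur).strip())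
--                 first = False
--             cur = []
--             keep = False
--         else:
--             cur.append(ch)
--             if ch not in string.punctuation and not ch.isspace():
--                 keep = True
--     if keep:
--         if not first:
--             out.append('\n')
--         out.append(''.join(cur).strip())
--     return ''.join(out)
-- ===== Notes on version B (the rewrite author's own statement) =====
-- stated objective: alternative
-- what changed: Replaces A's split-into-lines / per-line all(...) filter / join pipeline with a single character-level state machine over the raw text that tracks per-line significance incrementally and emits kept stripped lines with their newline separators directly into the output buffer.
import Mathlib
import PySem

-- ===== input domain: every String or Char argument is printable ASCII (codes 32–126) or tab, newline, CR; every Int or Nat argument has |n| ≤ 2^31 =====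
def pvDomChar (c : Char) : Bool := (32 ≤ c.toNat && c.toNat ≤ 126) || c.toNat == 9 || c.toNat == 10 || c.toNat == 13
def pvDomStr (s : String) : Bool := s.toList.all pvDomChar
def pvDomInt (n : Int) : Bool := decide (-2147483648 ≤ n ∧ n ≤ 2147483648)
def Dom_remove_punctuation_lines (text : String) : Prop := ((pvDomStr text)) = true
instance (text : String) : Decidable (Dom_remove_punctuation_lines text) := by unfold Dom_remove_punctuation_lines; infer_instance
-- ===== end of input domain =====

-- B replaces A's split-into-lines / filter / join pipeline by a single character-level state
-- machine over the raw text that tracks per-line significance incrementally and writes the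
-- output buffer with its '\n' separators directly (objective: alternative).

-- string.punctuation (fixed 32-character constant)
def pvPunctuation : List Char := "!\"#$%&'()*+,-./:;<=>?@[\\]^_`{|}~".toList

-- ===== PORT A =====
def remove_punctuation_lines (text : String) : String :=
  let lines := PySem.Chars.splitOn text.toList "\n".toList
  let non_punctuation_lines := lines.foldl (fun acc line =>
    let line := PySem.Chars.strip line
    if line.all (fun c => pvPunctuation.contains c || PySem.Chars.isspace c) then acc
    else acc ++ [line]) ([] : List (List Char))
  String.ofList (PySem.Chars.join "\n".toList non_punctuation_lines)

-- ===== PORT B =====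
-- loop body: state (out, cur, keep, first) — output chars, current-line chars,
-- "current line has a significant char", "no line emitted yet"
def pvStepB (st : List Char × List Char × Bool × Bool) (ch : Char) :
    List Char × List Char × Bool × Bool :=
  if ch = '\n' then
    if st.2.2.1 then
      (st.1 ++ (if st.2.2.2 then [] else ['\n']) ++ PySem.Chars.strip st.2.1, [], false, false)
    else (st.1, [], false, st.2.2.2)
  else
    (st.1, st.2.1 ++ [ch],
     st.2.2.1 || (!pvPunctuation.contains ch && !PySem.Chars.isspace ch), st.2.2.2)

-- final flush after the loop
def pvFlushB (st : List Char × List Char × Bool × Bool) : List Char :=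
  if st.2.2.1 then st.1 ++ (if st.2.2.2 then [] else ['\n']) ++ PySem.Chars.strip st.2.1
  else st.1

def remove_punctuation_lines_alt (text : String) : String :=
  String.ofList (pvFlushB (text.toList.foldl pvStepB ([], [], false, true)))

-- ===== PRECONDITION & SPEC =====
def Spec_remove_punctuation_lines (text : String) (out : String) : Prop := out = remove_punctuation_lines_alt text
instance (text : String) (out : String) : Decidable (Spec_remove_punctuation_lines text out) := by unfold Spec_remove_punctuation_lines; infer_instance

-- ===== CLAIM (what is proved, stated in full; the proofs are below) =====
def Claim_equal_remove_punctuation_lines : Prop := ∀ (text : String), Dom_remove_punctuation_lines text → Spec_remove_punctuation_lines text (remove_punctuation_lines text)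

-- ===== LEMMAS AND PROOFS =====

-- prepend a prefix to the first line
def pvConsHead (pre : List Char) : List (List Char) → List (List Char)
  | [] => [pre]
  | l :: ls => (pre ++ l) :: ls

-- structural line splitting at '\n'
def pvLines : List Char → List (List Char)
  | [] => [[]]
  | c :: cs => if c = '\n' then [] :: pvLines cs else pvConsHead [c] (pvLines cs)

theorem pvLines_ne_nil (cs : List Char) : pvLines cs ≠ [] := by
  cases cs with
  | nil => simp [pvLines]
  | cons c cs =>
    simp only [pvLines]
    split
    · simp
    · cases h : pvLines cs <;> simp [pvConsHead]

theorem pvConsHead_nil_of_ne (L : List (List Char)) (h : L ≠ []) : pvConsHead [] L = L := by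
  cases L with
  | nil => exact absurd rfl h
  | cons l ls => simp [pvConsHead]

theorem pvConsHead_append (a b : List Char) (L : List (List Char)) :
    pvConsHead a (pvConsHead b L) = pvConsHead (a ++ b) L := by
  cases L <;> simp [pvConsHead]

-- splitOn's fuel loop computes pvLines (sep = "\n")
theorem pv_go_spec (fuel : Nat) (l cur : List Char) (acc : List (List Char))
    (h : l.length < fuel) :
    PySem.Chars.splitOn.go ['\n'] fuel l cur acc
      = acc.reverse ++ pvConsHead cur.reverse (pvLines l) := by
  induction fuel generalizing l cur acc with
  | zero => omega
  | succ fuel ih =>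
    cases l with
    | nil => simp [PySem.Chars.splitOn.go, pvLines, pvConsHead]
    | cons c rest =>
      rw [PySem.Chars.splitOn.go]
      simp only [List.length_cons] at h
      by_cases hc : c = '\n'
      · subst hc
        have hpre : (['\n'] : List Char).isPrefixOf ('\n' :: rest) = true := by
          simp [List.isPrefixOf]
        rw [if_pos hpre]
        simp only [List.length_singleton, List.drop_succ_cons, List.drop_zero]
        rw [ih rest [] _ (by omega)]
        obtain ⟨x, xs, hL⟩ := List.exists_cons_of_ne_nil (pvLines_ne_nil rest)
        simp [pvLines, hL, pvConsHead]
      · have hpre : (['\n'] : List Char).isPrefixOf (c :: rest) = false := by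
          simp [List.isPrefixOf]
          exact fun h' => (hc h'.symm).elim
        rw [if_neg (by simp [hpre])]
        rw [ih rest (c :: cur) _ (by omega)]
        simp only [pvLines, if_neg hc, pvConsHead_append, List.reverse_cons]

theorem pv_splitOn_eq (cs : List Char) :
    PySem.Chars.splitOn cs ['\n'] = pvLines cs := by
  rw [PySem.Chars.splitOn, pv_go_spec _ _ _ _ (by omega)]
  simp [pvConsHead_nil_of_ne _ (pvLines_ne_nil cs)]

-- the kept, stripped lines (what A's filter retains)
def pvKept (L : List (List Char)) : List (List Char) :=
  (L.map PySem.Chars.strip).filter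
    (fun s => !(s.all (fun c => pvPunctuation.contains c || PySem.Chars.isspace c)))

-- A's loop is a filter of the stripped lines
theorem pv_foldA (lines : List (List Char)) (acc : List (List Char)) :
    lines.foldl (fun acc line =>
      let line := PySem.Chars.strip line
      if line.all (fun c => pvPunctuation.contains c || PySem.Chars.isspace c) then acc
      else acc ++ [line]) acc
    = acc ++ pvKept lines := by
  induction lines generalizing acc with
  | nil => simp [pvKept]
  | cons x xs ih =>
    rw [List.foldl_cons, ih]
    simp only [pvKept, List.map_cons, List.filter_cons]
    cases h : (PySem.Chars.strip x).all (fun c => pvPunctuation.contains c || PySem.Chars.isspace c) with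
    | false => simp
    | true => simp

-- dropping a whitespace prefix cannot change whether a non-whitespace predicate holds somewhere
theorem pv_any_dropWhile (l : List Char) (q : Char → Bool)
    (hq : ∀ c, PySem.Chars.isspace c = true → q c = false) :
    (l.dropWhile PySem.Chars.isspace).any q = l.any q := by
  induction l with
  | nil => rfl
  | cons c cs ih =>
    by_cases hp : PySem.Chars.isspace c
    · simp [hp, ih, hq c hp]
    · simp [hp]

theorem pv_any_strip (l : List Char) (q : Char → Bool)
    (hq : ∀ c, PySem.Chars.isspace c = true → q c = false) :
    (PySem.Chars.strip l).any q = l.any q := by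
  rw [PySem.Chars.strip, PySem.Chars.rstrip, PySem.Chars.lstrip]
  rw [List.any_reverse, pv_any_dropWhile _ _ hq, List.any_reverse, pv_any_dropWhile _ _ hq]

-- significance survives stripping: the stripped line is all punct/space iff the raw line
-- has no significant char
theorem pv_sig_strip (cur : List Char) :
    (PySem.Chars.strip cur).all (fun c => pvPunctuation.contains c || PySem.Chars.isspace c)
      = !(cur.any (fun c => !pvPunctuation.contains c && !PySem.Chars.isspace c)) := by
  rw [List.all_eq_not_any_not,
    pv_any_strip cur (fun c => !(pvPunctuation.contains c || PySem.Chars.isspace c))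
      (by intro c hc; simp [hc])]
  have hf : (fun c => !(pvPunctuation.contains c || PySem.Chars.isspace c))
      = (fun c => !pvPunctuation.contains c && !PySem.Chars.isspace c) := by
    funext c; simp [Bool.not_or]
  rw [hf]

-- glue kept lines after the existing buffer: with first = true the first line carries no
-- separator, otherwise every line is preceded by '\n'
def pvGlue (first : Bool) (L : List (List Char)) : List Char :=
  if first then PySem.Chars.join ['\n'] L else L.flatMap (fun s => '\n' :: s)

theorem pv_join_cons (l : List Char) (ls : List (List Char)) :
    PySem.Chars.join ['\n'] (l :: ls) = l ++ ls.flatMap (fun s => '\n' :: s) := by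
  induction ls generalizing l with
  | nil => simp [PySem.Chars.join, List.intercalate]
  | cons x xs ih =>
    have h2 : PySem.Chars.join ['\n'] (l :: x :: xs)
        = l ++ ['\n'] ++ PySem.Chars.join ['\n'] (x :: xs) := by
      simp [PySem.Chars.join, List.intercalate, List.intersperse]
    rw [h2, ih x]
    simp

-- the loop invariant of B's state machine
theorem pv_foldB (cs : List Char) : ∀ (out cur : List Char) (first : Bool),
    pvFlushB (cs.foldl pvStepB
      (out, cur, cur.any (fun c => !pvPunctuation.contains c && !PySem.Chars.isspace c), first))
      = out ++ pvGlue first (pvKept (pvConsHead cur (pvLines cs))) := by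
  induction cs with
  | nil =>
    intro out cur first
    simp only [List.foldl_nil, pvFlushB]
    have hK : pvKept (pvConsHead cur (pvLines []))
        = if cur.any (fun c => !pvPunctuation.contains c && !PySem.Chars.isspace c)
          then [PySem.Chars.strip cur] else [] := by
      simp only [pvLines, pvConsHead, List.append_nil, pvKept, List.map_cons, List.map_nil,
        List.filter_cons, List.filter_nil, pv_sig_strip]
      cases cur.any (fun c => !pvPunctuation.contains c && !PySem.Chars.isspace c) <;> simp
    rw [hK]
    cases h : cur.any (fun c => !pvPunctuation.contains c && !PySem.Chars.isspace c) <;>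
      cases first <;>
        simp [pvGlue, PySem.Chars.join, List.intercalate]
  | cons c cs ih =>
    intro out cur first
    rw [List.foldl_cons]
    by_cases hc : c = '\n'
    · subst hc
      have hstep : ∀ (K f : Bool), pvStepB (out, cur, K, f) '\n'
          = if K then (out ++ (if f then [] else ['\n']) ++ PySem.Chars.strip cur, [], false, false)
            else (out, [], false, f) := by
        intro K f
        simp [pvStepB]
      rw [hstep]
      cases hs : cur.any (fun c => !pvPunctuation.contains c && !PySem.Chars.isspace c) with
      | true =>
        rw [if_pos rfl]
        have h2 := ih (out ++ (if first then [] else ['\n']) ++ PySem.Chars.strip cur) [] false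
        simp only [List.any_nil] at h2
        rw [h2, pvConsHead_nil_of_ne _ (pvLines_ne_nil cs)]
        have h1 : pvConsHead cur (pvLines ('\n' :: cs)) = cur :: pvLines cs := by
          simp [pvLines, pvConsHead]
        have hK : pvKept (pvConsHead cur (pvLines ('\n' :: cs)))
            = PySem.Chars.strip cur :: pvKept (pvLines cs) := by
          rw [h1]
          unfold pvKept
          rw [List.map_cons, List.filter_cons]
          simp only [pv_sig_strip, hs, Bool.not_true, Bool.not_false]
          simp
        rw [hK]
        cases first <;> simp [pvGlue, pv_join_cons]
      | false =>
        rw [if_neg (by simp)]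
        have h2 := ih out [] first
        simp only [List.any_nil] at h2
        rw [h2, pvConsHead_nil_of_ne _ (pvLines_ne_nil cs)]
        have h1 : pvConsHead cur (pvLines ('\n' :: cs)) = cur :: pvLines cs := by
          simp [pvLines, pvConsHead]
        have hK : pvKept (pvConsHead cur (pvLines ('\n' :: cs))) = pvKept (pvLines cs) := by
          rw [h1]
          unfold pvKept
          rw [List.map_cons, List.filter_cons]
          simp only [pv_sig_strip, hs, Bool.not_true, Bool.not_false]
          simp
        rw [hK]
    · have hstep : pvStepB
          (out, cur, cur.any (fun c => !pvPunctuation.contains c && !PySem.Chars.isspace c), first) c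
          = (out, cur ++ [c],
             (cur ++ [c]).any (fun c => !pvPunctuation.contains c && !PySem.Chars.isspace c), first) := by
        simp [pvStepB, hc]
      rw [hstep, ih out (cur ++ [c]) first]
      have hL : pvConsHead cur (pvLines (c :: cs)) = pvConsHead (cur ++ [c]) (pvLines cs) := by
        simp only [pvLines, if_neg hc, pvConsHead_append]
      rw [hL]

-- ===== VERDICT (by name: the statement is the Claim_ definition above) =====
theorem remove_punctuation_lines_spec : Claim_equal_remove_punctuation_lines := by
  intro text _
  unfold Spec_remove_punctuation_lines remove_punctuation_lines remove_punctuation_lines_alt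
  have hsep : ("\n" : String).toList = ['\n'] := rfl
  simp only [hsep, pv_splitOn_eq, pv_foldA, List.nil_append]
  have := pv_foldB text.toList [] [] true
  simp only [List.any_nil] at this
  rw [this, pvConsHead_nil_of_ne _ (pvLines_ne_nil text.toList)]
  simp [pvGlue]
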